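-- pv_equiv track=rewrite | github.com/aambrioso1/CodeWars | spiralize.py | loop
-- ===== SOURCE A (Python) =====
-- def loop(arr):
-- 	size = len(arr[0])
-- 	for i in [0, size - 1]:
-- 		for j in range(size):
-- 			arr[i][j] = 1
-- 	for i in range(size):
-- 		arr[i][size - 1] = 1
-- 	return arr
-- ===== SOURCE B (Python) =====
-- def loop(arr):
--     size = len(arr[0])
--     for i in range(size):
--         for j in range(size):
--             if i == 0 or i == size - 1 or j == size - 1:
--                 arr[i][j] = 1
--     return arr
-- ===== Notes on version B (the rewrite author's own statement) =====
-- stated objective: alternative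
-- what changed: Replaces the three border loops (top row, bottom row, right column) with a single nested scan over the size x size grid writing 1 where a boundary predicate (i==0 or i==size-1 or j==size-1) holds.
import Mathlib
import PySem

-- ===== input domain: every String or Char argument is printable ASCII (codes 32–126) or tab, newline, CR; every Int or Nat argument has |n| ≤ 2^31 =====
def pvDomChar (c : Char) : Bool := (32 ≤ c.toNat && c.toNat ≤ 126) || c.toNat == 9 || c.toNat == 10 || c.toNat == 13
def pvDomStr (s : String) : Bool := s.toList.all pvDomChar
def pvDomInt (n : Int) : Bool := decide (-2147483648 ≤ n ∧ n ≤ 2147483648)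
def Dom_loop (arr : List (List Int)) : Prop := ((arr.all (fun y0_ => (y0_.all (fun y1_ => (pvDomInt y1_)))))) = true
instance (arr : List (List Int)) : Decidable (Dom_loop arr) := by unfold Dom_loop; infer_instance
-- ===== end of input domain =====

-- B replaces A's three border loops by one nested scan with a boundary predicate
-- (i = 0 ∨ i = size-1 ∨ j = size-1); same cells are written, so the results agree.
-- Both Pythons mutate `arr` in place identically; the proof is about the return value.

-- ===== PORT A =====
-- write 1 into cell (i, j): arr[i][j] = 1 (no-op when out of range; Pre_ excludes raising inputs)
def pvW (a : List (List Int)) (i j : Nat) : List (List Int) :=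
  a.set i ((a.getD i []).set j 1)

def loop (arr : List (List Int)) : List (List Int) :=
  let size := (arr.headD []).length
  let a1 := [0, size - 1].foldl
    (fun a i => (List.range size).foldl (fun a j => pvW a i j) a) arr
  (List.range size).foldl (fun a i => pvW a i (size - 1)) a1

-- ===== PORT B =====
def loop_alt (arr : List (List Int)) : List (List Int) :=
  let size := (arr.headD []).length
  (List.range size).foldl
    (fun a i => (List.range size).foldl
      (fun a j => if i = 0 ∨ i = size - 1 ∨ j = size - 1 then pvW a i j else a) a)
    arr

-- ===== PRECONDITION & SPEC =====
-- Pre_ excludes exactly the inputs on which A raises IndexError: the empty list,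
-- and (when size = len(arr[0]) ≥ 1) fewer than size rows or a row among the first
-- size rows shorter than size.
def Pre_loop (arr : List (List Int)) : Prop :=
  arr ≠ [] ∧
    ((arr.headD []).length = 0 ∨
      ((arr.headD []).length ≤ arr.length ∧
        ∀ row ∈ arr.take (arr.headD []).length, (arr.headD []).length ≤ row.length))
instance (arr : List (List Int)) : Decidable (Pre_loop arr) := by unfold Pre_loop; infer_instance

def pvWitness_loop : List (List Int) := [[0, 0], [0, 0]]

def Spec_loop (arr : List (List Int)) (out : List (List Int)) : Prop := out = loop_alt arr
instance (arr : List (List Int)) (out : List (List Int)) : Decidable (Spec_loop arr out) := by unfold Spec_loop; infer_instance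

-- ===== CLAIM (what is proved, stated in full; the proofs are below) =====
def Claim_equal_loop : Prop := ∀ (arr : List (List Int)), Dom_loop arr → Pre_loop arr → Spec_loop arr (loop arr)

-- ===== LEMMAS AND PROOFS =====

-- cell getter: value at row k, column l (none when out of range)
def pvG (a : List (List Int)) (k l : Nat) : Option Int := (a.getD k [])[l]?

-- write a 1 over an Option cell (none stays none: an out-of-range write is a no-op)
def pvM (p : Prop) [Decidable p] (x : Option Int) : Option Int :=
  if p then x.map (fun _ => (1 : Int)) else x

theorem pvM_pvM (p q : Prop) [Decidable p] [Decidable q] (x : Option Int) :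
    pvM p (pvM q x) = pvM (p ∨ q) x := by
  unfold pvM
  by_cases hp : p <;> by_cases hq : q <;> cases x <;> simp [hp, hq]

theorem pvM_congr (p q : Prop) [Decidable p] [Decidable q] (h : p ↔ q) (x : Option Int) :
    pvM p x = pvM q x := by
  unfold pvM
  by_cases hp : p
  · rw [if_pos hp, if_pos (h.mp hp)]
  · rw [if_neg hp, if_neg (fun hq => hp (h.mpr hq))]

theorem getD_set_self (a : List (List Int)) (i : Nat) (r : List Int) (h : i < a.length) :
    (a.set i r).getD i [] = r := by
  unfold List.getD
  rw [List.getElem?_set_self h]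
  rfl

theorem getD_set_ne (a : List (List Int)) (i : Nat) (r : List Int) (k : Nat) (h : k ≠ i) :
    (a.set i r).getD k [] = a.getD k [] := by
  unfold List.getD
  rw [List.getElem?_set_ne (Ne.symm h)]

theorem pvW_getD (a : List (List Int)) (i j k : Nat) :
    (pvW a i j).getD k [] =
      if k = i ∧ i < a.length then (a.getD i []).set j 1 else a.getD k [] := by
  unfold pvW
  by_cases hk : k = i
  · subst hk
    by_cases hl : k < a.length
    · rw [getD_set_self _ _ _ hl, if_pos ⟨rfl, hl⟩]
    · rw [List.set_eq_of_length_le (by omega), if_neg (fun h => hl h.2)]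
  · rw [getD_set_ne _ _ _ _ hk, if_neg (fun h => hk h.1)]

theorem pvW_length (a : List (List Int)) (i j : Nat) : (pvW a i j).length = a.length := by
  simp [pvW]

theorem pvG_pvW (a : List (List Int)) (i j k l : Nat) :
    pvG (pvW a i j) k l = pvM (k = i ∧ l = j) (pvG a k l) := by
  unfold pvG pvM
  rw [pvW_getD]
  split_ifs with h hc hc
  · obtain ⟨hk, hi⟩ := h
    obtain ⟨-, hl⟩ := hc
    subst hk; subst hl
    by_cases hr : l < (a.getD k []).length
    · rw [List.getElem?_set_self hr, List.getElem?_eq_getElem hr]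
      rfl
    · rw [List.getElem?_eq_none (by simpa using Nat.le_of_not_lt hr),
          List.getElem?_eq_none (Nat.le_of_not_lt hr)]
      rfl
  · obtain ⟨hk, hi⟩ := h
    subst hk
    have hl : l ≠ j := fun hlj => hc ⟨rfl, hlj⟩
    rw [List.getElem?_set_ne (Ne.symm hl)]
  · obtain ⟨hk, hl⟩ := hc
    subst hk; subst hl
    have hlen : a.length ≤ k := by
      by_contra hh
      exact h ⟨rfl, Nat.lt_of_not_le hh⟩
    have hD : a.getD k [] = [] := by
      unfold List.getD
      rw [List.getElem?_eq_none hlen]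
      rfl
    rw [hD]
    rfl
  · rfl

-- generic fold-preservation lemmas
theorem foldl_length {β : Type} (f : List (List Int) → β → List (List Int)) (xs : List β)
    (a : List (List Int)) (hf : ∀ a x, (f a x).length = a.length) :
    (xs.foldl f a).length = a.length := by
  induction xs generalizing a with
  | nil => rfl
  | cons x xs ih => simp only [List.foldl_cons]; rw [ih, hf]

theorem pvG_rowfold (P : Nat → Prop) [DecidablePred P] (i n : Nat) (a : List (List Int)) (k l : Nat) :
    pvG ((List.range n).foldl (fun a j => if P j then pvW a i j else a) a) k l =
      pvM (k = i ∧ l < n ∧ P l) (pvG a k l) := by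
  induction n generalizing a with
  | zero => simp [pvM]
  | succ n ih =>
    rw [List.range_succ, List.foldl_append, List.foldl_cons, List.foldl_nil]
    by_cases hP : P n
    · rw [if_pos hP, pvG_pvW, ih, pvM_pvM]
      refine pvM_congr _ _ ?_ _
      constructor
      · rintro (⟨hk, hl⟩ | ⟨hk, hl, hp⟩)
        · exact ⟨hk, by omega, by rw [hl]; exact hP⟩
        · exact ⟨hk, by omega, hp⟩
      · rintro ⟨hk, hl, hp⟩
        rcases Nat.lt_succ_iff_lt_or_eq.mp hl with hlt | heq
        · exact Or.inr ⟨hk, hlt, hp⟩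
        · exact Or.inl ⟨hk, heq⟩
    · rw [if_neg hP, ih]
      refine pvM_congr _ _ ?_ _
      constructor
      · rintro ⟨hk, hl, hp⟩
        exact ⟨hk, by omega, hp⟩
      · rintro ⟨hk, hl, hp⟩
        rcases Nat.lt_succ_iff_lt_or_eq.mp hl with hlt | heq
        · exact ⟨hk, hlt, hp⟩
        · exact absurd (heq ▸ hp) hP

-- fold of writes down a column c: cells (i, c) for i < n
theorem pvG_colfold (c n : Nat) (a : List (List Int)) (k l : Nat) :
    pvG ((List.range n).foldl (fun a i => pvW a i c) a) k l =
      pvM (k < n ∧ l = c) (pvG a k l) := by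
  induction n generalizing a with
  | zero => simp [pvM]
  | succ n ih =>
    rw [List.range_succ, List.foldl_append, List.foldl_cons, List.foldl_nil,
        pvG_pvW, ih, pvM_pvM]
    refine pvM_congr _ _ ?_ _
    constructor
    · rintro (⟨hk, hc⟩ | ⟨hk, hc⟩)
      · exact ⟨by omega, hc⟩
      · exact ⟨by omega, hc⟩
    · rintro ⟨hk, hc⟩
      rcases Nat.lt_succ_iff_lt_or_eq.mp hk with hlt | heq
      · exact Or.inr ⟨hlt, hc⟩
      · exact Or.inl ⟨heq, hc⟩

-- the outer fold of B: all border cells of the size × size square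
theorem pvG_loop_alt_fold (s m : Nat) (a : List (List Int)) (k l : Nat) :
    pvG ((List.range m).foldl
      (fun a i => (List.range s).foldl
        (fun a j => if i = 0 ∨ i = s - 1 ∨ j = s - 1 then pvW a i j else a) a) a) k l =
      pvM (k < m ∧ l < s ∧ (k = 0 ∨ k = s - 1 ∨ l = s - 1)) (pvG a k l) := by
  induction m generalizing a with
  | zero => simp [pvM]
  | succ m ih =>
    rw [List.range_succ, List.foldl_append, List.foldl_cons, List.foldl_nil,
        pvG_rowfold (fun j => m = 0 ∨ m = s - 1 ∨ j = s - 1), ih, pvM_pvM]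
    refine pvM_congr _ _ ?_ _
    constructor
    · rintro (⟨hk, hl, hb⟩ | ⟨hk, hl, hb⟩)
      · exact ⟨by omega, hl, by subst hk; exact hb⟩
      · exact ⟨by omega, hl, hb⟩
    · rintro ⟨hk, hl, hb⟩
      rcases Nat.lt_succ_iff_lt_or_eq.mp hk with hlt | heq
      · exact Or.inr ⟨hlt, hl, hb⟩
      · exact Or.inl ⟨heq, hl, by subst heq; exact hb⟩

theorem pvG_loop (arr : List (List Int)) (k l : Nat) :
    pvG (loop arr) k l =
      pvM ((k = 0 ∨ k = (arr.headD []).length - 1 ∨ l = (arr.headD []).length - 1) ∧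
            k < (arr.headD []).length ∧ l < (arr.headD []).length) (pvG arr k l) := by
  unfold loop
  simp only [List.foldl_cons, List.foldl_nil]
  set s := (arr.headD []).length with hs
  rw [pvG_colfold,
      show (fun (a : List (List Int)) j => pvW a (s - 1) j) =
        (fun a j => if True then pvW a (s - 1) j else a) from by funext a j; simp,
      pvG_rowfold (fun _ => True),
      show (fun (a : List (List Int)) j => pvW a 0 j) =
        (fun a j => if True then pvW a 0 j else a) from by funext a j; simp,
      pvG_rowfold (fun _ => True), pvM_pvM, pvM_pvM]
  refine pvM_congr _ _ ?_ _
  constructor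
  · rintro ((⟨hk, hl⟩ | ⟨hk, hl, -⟩) | ⟨hk, hl, -⟩)
    · exact ⟨by omega, by omega, by omega⟩
    · exact ⟨by omega, by omega, by omega⟩
    · exact ⟨by omega, by omega, by omega⟩
  · rintro ⟨(h | h | h), hk, hl⟩
    · exact Or.inr ⟨h, hl, trivial⟩
    · exact Or.inl (Or.inr ⟨h, hl, trivial⟩)
    · exact Or.inl (Or.inl ⟨hk, h⟩)

theorem pvG_loop_alt (arr : List (List Int)) (k l : Nat) :
    pvG (loop_alt arr) k l =
      pvM ((k = 0 ∨ k = (arr.headD []).length - 1 ∨ l = (arr.headD []).length - 1) ∧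
            k < (arr.headD []).length ∧ l < (arr.headD []).length) (pvG arr k l) := by
  unfold loop_alt
  simp only
  rw [pvG_loop_alt_fold]
  refine pvM_congr _ _ ?_ _
  constructor
  · rintro ⟨hk, hl, hb⟩
    exact ⟨hb, hk, hl⟩
  · rintro ⟨hb, hk, hl⟩
    exact ⟨hk, hl, hb⟩

theorem loop_length (arr : List (List Int)) : (loop arr).length = arr.length := by
  unfold loop
  simp only [List.foldl_cons, List.foldl_nil]
  rw [foldl_length _ _ _ (fun a i => pvW_length a i _),
      foldl_length _ _ _ (fun a j => pvW_length a _ j),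
      foldl_length _ _ _ (fun a j => pvW_length a _ j)]

theorem loop_alt_length (arr : List (List Int)) : (loop_alt arr).length = arr.length := by
  unfold loop_alt
  simp only
  rw [foldl_length]
  intro a i
  rw [foldl_length]
  intro a' j
  split
  · exact pvW_length _ _ _
  · rfl

theorem rows_eq (arr : List (List Int)) (k : Nat) :
    (loop arr).getD k [] = (loop_alt arr).getD k [] := by
  apply List.ext_getElem?
  intro l
  have h1 := pvG_loop arr k l
  have h2 := pvG_loop_alt arr k l
  unfold pvG at h1 h2
  rw [h1, h2]

theorem loop_eq_alt (arr : List (List Int)) : loop arr = loop_alt arr := by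
  apply List.ext_getElem?
  intro k
  have hlen : (loop arr).length = (loop_alt arr).length := by
    rw [loop_length, loop_alt_length]
  by_cases hk : k < (loop arr).length
  · rw [List.getElem?_eq_getElem hk, List.getElem?_eq_getElem (hlen ▸ hk)]
    have h := rows_eq arr k
    rw [List.getD_eq_getElem _ _ hk, List.getD_eq_getElem _ _ (hlen ▸ hk)] at h
    rw [h]
  · rw [List.getElem?_eq_none (by omega), List.getElem?_eq_none (by omega)]

-- ===== VERDICT (by name: the statement is the Claim_ definition above) =====
theorem loop_spec : Claim_equal_loop := by
  intro arr _ _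
  unfold Spec_loop
  exact loop_eq_alt arr
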